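-- pv_equiv track=rewrite | github.com/terrydlek/first-project | 코테 알고리즘 공부/겹치는 선분의 길이(programmers).py | solution
-- ===== SOURCE A (Python) =====
-- def solution(lines):
--     answer = 0
--     li = [0] * 201
--     for i in lines:
--         for j in range(i[0] + 100, i[1] + 101):
--             li[j] += 1
--     for k in range(1, len(li)):
--         if li[k] > 1:
--             if li[k - 1] > 1 and li.count(2) != 2:
--                 answer += 1
--     return answer
-- ===== SOURCE B (Python) =====
-- def solution(lines):
--     # Difference array + one prefix-sum pass; no 201-wide per-segment writes and no
--     # repeated li.count scans.
--     diff = [0] * 202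
--     for seg in lines:
--         a, b = seg[0], seg[1]
--         if a <= b:
--             diff[a + 100] += 1
--             diff[b + 101] -= 1
--     run = prev = 0
--     twos = pairs = 0
--     for k in range(201):
--         run += diff[k]
--         if run == 2:
--             twos += 1
--         if k > 0 and run > 1 and prev > 1:
--             pairs += 1
--         prev = run
--     return 0 if twos == 2 else pairs
-- ===== Notes on version B (the rewrite author's own statement) =====
-- stated objective: alternative
-- what changed: B builds a 202-cell difference array (two O(1) writes per segment) and reconstructs coverage in one prefix-sum pass that simultaneously counts adjacent >1 pairs and cells equal to 2, instead of A's per-cell increments over each segment's whole range and a fresh li.count(2) scan inside the answer loop.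
-- outside the precondition, e.g. on solution([[0, 2], [-110, 2]]): A returns 2, B returns 0
import Mathlib
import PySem

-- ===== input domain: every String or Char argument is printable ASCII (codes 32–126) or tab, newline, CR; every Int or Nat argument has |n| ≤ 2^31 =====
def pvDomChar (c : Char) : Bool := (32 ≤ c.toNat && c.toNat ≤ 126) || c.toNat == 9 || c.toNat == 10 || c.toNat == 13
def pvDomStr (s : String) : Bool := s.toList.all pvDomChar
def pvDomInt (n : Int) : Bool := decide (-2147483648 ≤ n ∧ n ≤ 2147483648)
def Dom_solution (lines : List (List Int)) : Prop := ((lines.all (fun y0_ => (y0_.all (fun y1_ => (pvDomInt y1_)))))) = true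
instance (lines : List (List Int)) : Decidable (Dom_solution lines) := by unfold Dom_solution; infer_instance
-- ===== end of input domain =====

-- B replaces A's per-cell range increments and repeated li.count(2) scans by a
-- difference array plus a single prefix-sum pass (same return value on Pre_).


-- ===== PORT A =====
-- shared primitive: Python's 'xs[i] += v' (negative-index semantics via PySem)
def pyAddAt (xs : List Int) (i : Int) (v : Int) : List Int :=
  PySem.List.pySetD xs i (PySem.List.pyGetD xs i 0 + v)

def solution (lines : List (List Int)) : Int :=
  let li := lines.foldl
    (fun li i =>
      (PySem.List.pyRange (PySem.List.pyGetD i 0 0 + 100) (PySem.List.pyGetD i 1 0 + 101)).foldl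
        (fun li j => pyAddAt li j 1) li)
    (List.replicate 201 0)
  (PySem.List.pyRange 1 (li.length : Int)).foldl
    (fun answer k =>
      if 1 < PySem.List.pyGetD li k 0 then
        if 1 < PySem.List.pyGetD li (k - 1) 0 ∧ PySem.List.count li 2 ≠ 2 then answer + 1
        else answer
      else answer)
    0

-- ===== PORT B =====
def solution_alt (lines : List (List Int)) : Int :=
  let diff := lines.foldl
    (fun diff seg =>
      let a := PySem.List.pyGetD seg 0 0
      let b := PySem.List.pyGetD seg 1 0
      if a ≤ b then pyAddAt (pyAddAt diff (a + 100) 1) (b + 101) (-1) else diff)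
    (List.replicate 202 0)
  let st := (PySem.List.pyRange 0 201).foldl
    (fun (st : Int × Int × Int × Int) k =>
      let run := st.1 + PySem.List.pyGetD diff k 0
      let twos := if run = 2 then st.2.2.1 + 1 else st.2.2.1
      let pairs := if 0 < k ∧ 1 < run ∧ 1 < st.2.1 then st.2.2.2 + 1 else st.2.2.2
      (run, run, twos, pairs))
    (0, 0, 0, 0)
  if st.2.2.1 = 2 then 0 else st.2.2.2

-- ===== PRECONDITION & SPEC =====
-- Pre_ restricts to the problem's natural domain: every row has at least two entries and,
-- whenever start ≤ end (a nonempty coverage range), both endpoints lie in [-100, 100].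
-- Outside it A either raises IndexError or returns a value only through Python's
-- negative-index wraparound on the fixed 201-cell table, an artefact of A's indexing.
def Pre_solution (lines : List (List Int)) : Prop :=
  ∀ l ∈ lines, 2 ≤ l.length ∧
    (l.getD 0 0 ≤ l.getD 1 0 → -100 ≤ l.getD 0 0 ∧ l.getD 1 0 ≤ 100)
instance (lines : List (List Int)) : Decidable (Pre_solution lines) := by
  unfold Pre_solution; infer_instance

def pvWitness_solution : List (List Int) := [[0, 5], [3, 10], [7, 2]]

def Spec_solution (lines : List (List Int)) (out : Int) : Prop := out = solution_alt lines
instance (lines : List (List Int)) (out : Int) : Decidable (Spec_solution lines out) := by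
  unfold Spec_solution; infer_instance

-- ===== CLAIM (what is proved, stated in full; the proofs are below) =====
def Claim_equal_solution : Prop :=
  ∀ (lines : List (List Int)), Dom_solution lines → Pre_solution lines →
    Spec_solution lines (solution lines)

-- ===== LEMMAS AND PROOFS =====

-- per-row coverage indicator at cell j, and the whole table's value at cell j
def covSeg (l : List Int) (j : Int) : Int :=
  if l.getD 0 0 ≤ l.getD 1 0 ∧ l.getD 0 0 + 100 ≤ j ∧ j ≤ l.getD 1 0 + 100 then 1 else 0
def cov (lines : List (List Int)) (j : Int) : Int := (lines.map (fun l => covSeg l j)).sum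

-- per-row difference-array contribution at cell j
def dSeg (l : List Int) (j : Int) : Int :=
  if l.getD 0 0 ≤ l.getD 1 0 then
    (if j = l.getD 0 0 + 100 then 1 else 0) + (if j = l.getD 1 0 + 101 then -1 else 0)
  else 0
def dcov (lines : List (List Int)) (j : Int) : Int := (lines.map (fun l => dSeg l j)).sum

lemma length_pyAddAt (xs : List Int) (i v : Int) : (pyAddAt xs i v).length = xs.length := by
  simp [pyAddAt, PySem.List.length_pySetD]

lemma pyGetD_pyAddAt (xs : List Int) (n : Nat) (hn : n < xs.length) (v : Int) (j : Nat) :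
    PySem.List.pyGetD (pyAddAt xs (n : Int) v) (j : Int) 0 =
      PySem.List.pyGetD xs (j : Int) 0 + (if (j : Int) = (n : Int) then v else 0) := by
  rw [pyAddAt, PySem.List.pyGetD_pySetD_natCast xs n j _ 0 hn]
  by_cases h : j = n
  · subst h; simp
  · have h' : (j : Int) ≠ (n : Int) := by exact_mod_cast h
    simp [h, h']

lemma bumpRange_spec (n : Nat) : ∀ (lo hi : Int) (acc : List Int), (hi - lo).toNat = n →
    0 ≤ lo → hi ≤ (acc.length : Int) →
    ((PySem.List.pyRange lo hi).foldl (fun li j => pyAddAt li j 1) acc).length = acc.length ∧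
    ∀ j : Nat, PySem.List.pyGetD
        ((PySem.List.pyRange lo hi).foldl (fun li j => pyAddAt li j 1) acc) (j : Int) 0
      = PySem.List.pyGetD acc (j : Int) 0 + (if lo ≤ (j : Int) ∧ (j : Int) < hi then 1 else 0) := by
  induction n with
  | zero =>
    intro lo hi acc hn h0 h1
    rw [PySem.List.pyRange_one_eq_nil (by omega)]
    simp only [List.foldl_nil]
    refine ⟨by trivial, fun j => ?_⟩
    have hno : ¬ (lo ≤ (j : Int) ∧ (j : Int) < hi) := by omega
    simp [hno]
  | succ n ih =>
    intro lo hi acc hn h0 h1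
    rw [PySem.List.pyRange_one_cons (by omega)]
    simp only [List.foldl_cons]
    have hlen : (pyAddAt acc lo 1).length = acc.length := length_pyAddAt acc lo 1
    obtain ⟨L, H⟩ := ih (lo + 1) hi (pyAddAt acc lo 1) (by omega) (by omega) (by rw [hlen]; exact h1)
    refine ⟨by rw [L, hlen], fun j => ?_⟩
    rw [H j]
    have hcast : lo = ((lo.toNat : Nat) : Int) := by omega
    have hnlt : lo.toNat < acc.length := by omega
    rw [hcast, pyGetD_pyAddAt acc lo.toNat hnlt 1 j]
    split_ifs <;> omega

lemma pyGetD_one (l : List Int) (h : 2 ≤ l.length) : PySem.List.pyGetD l 1 0 = l.getD 1 0 := by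
  match l, h with
  | a :: b :: t, _ =>
    rw [PySem.List.pyGetD_eq_getElem (a :: b :: t) 0 (by omega) (by simp)]
    simp [List.getD]

lemma liA_spec (lines : List (List Int)) (hpre : Pre_solution lines) :
    ∀ acc : List Int, acc.length = 201 →
    (lines.foldl
      (fun li i =>
        (PySem.List.pyRange (PySem.List.pyGetD i 0 0 + 100) (PySem.List.pyGetD i 1 0 + 101)).foldl
          (fun li j => pyAddAt li j 1) li) acc).length = 201 ∧
    ∀ j : Nat, PySem.List.pyGetD
        (lines.foldl
          (fun li i =>
            (PySem.List.pyRange (PySem.List.pyGetD i 0 0 + 100) (PySem.List.pyGetD i 1 0 + 101)).foldl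
              (fun li j => pyAddAt li j 1) li) acc) (j : Int) 0
      = PySem.List.pyGetD acc (j : Int) 0 + cov lines (j : Int) := by
  revert hpre
  induction lines with
  | nil => intro _ acc hacc; simp [cov, hacc]
  | cons l ls ih =>
    intro hpre acc hacc
    have hl := hpre l (List.mem_cons_self)
    have hls : Pre_solution ls := fun x hx => hpre x (List.mem_cons_of_mem _ hx)
    simp only [List.foldl_cons]
    rw [PySem.List.pyGetD_zero, pyGetD_one l hl.1]
    by_cases hab : l.getD 0 0 ≤ l.getD 1 0
    · have hb := hl.2 hab
      obtain ⟨L1, H1⟩ := bumpRange_spec (l.getD 1 0 + 101 - (l.getD 0 0 + 100)).toNat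
        (l.getD 0 0 + 100) (l.getD 1 0 + 101) acc rfl (by omega) (by rw [hacc]; push_cast; omega)
      obtain ⟨L2, H2⟩ := ih hls _ (by rw [L1, hacc])
      refine ⟨L2, fun j => ?_⟩
      rw [H2 j, H1 j]
      simp only [cov, covSeg, List.map_cons, List.sum_cons]
      have hiff : (l.getD 0 0 + 100 ≤ (j : Int) ∧ (j : Int) < l.getD 1 0 + 101) ↔
          (l.getD 0 0 ≤ l.getD 1 0 ∧ l.getD 0 0 + 100 ≤ (j : Int) ∧ (j : Int) ≤ l.getD 1 0 + 100) := by
        omega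
      simp only [hiff]
      ring
    · rw [PySem.List.pyRange_one_eq_nil (by omega)]
      simp only [List.foldl_nil]
      obtain ⟨L2, H2⟩ := ih hls acc hacc
      refine ⟨L2, fun j => ?_⟩
      rw [H2 j]
      simp only [cov, covSeg, List.map_cons, List.sum_cons]
      rw [if_neg (by tauto)]
      ring

lemma diffB_spec (lines : List (List Int)) (hpre : Pre_solution lines) :
    ∀ acc : List Int, acc.length = 202 →
    (lines.foldl
      (fun diff seg =>
        let a := PySem.List.pyGetD seg 0 0
        let b := PySem.List.pyGetD seg 1 0
        if a ≤ b then pyAddAt (pyAddAt diff (a + 100) 1) (b + 101) (-1) else diff) acc).length = 202 ∧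
    ∀ j : Nat, PySem.List.pyGetD
        (lines.foldl
          (fun diff seg =>
            let a := PySem.List.pyGetD seg 0 0
            let b := PySem.List.pyGetD seg 1 0
            if a ≤ b then pyAddAt (pyAddAt diff (a + 100) 1) (b + 101) (-1) else diff) acc) (j : Int) 0
      = PySem.List.pyGetD acc (j : Int) 0 + dcov lines (j : Int) := by
  revert hpre
  induction lines with
  | nil => intro _ acc hacc; simp [dcov, hacc]
  | cons l ls ih =>
    intro hpre acc hacc
    have hl := hpre l List.mem_cons_self
    have hls : Pre_solution ls := fun x hx => hpre x (List.mem_cons_of_mem _ hx)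
    simp only [List.foldl_cons]
    rw [PySem.List.pyGetD_zero, pyGetD_one l hl.1]
    by_cases hab : l.getD 0 0 ≤ l.getD 1 0
    · have hb := hl.2 hab
      rw [if_pos hab]
      have hc1 : l.getD 0 0 + 100 = (((l.getD 0 0 + 100).toNat : Nat) : Int) := by omega
      have hc2 : l.getD 1 0 + 101 = (((l.getD 1 0 + 101).toNat : Nat) : Int) := by omega
      obtain ⟨L2, H2⟩ := ih hls (pyAddAt (pyAddAt acc (l.getD 0 0 + 100) 1) (l.getD 1 0 + 101) (-1))
        (by rw [length_pyAddAt, length_pyAddAt, hacc])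
      refine ⟨L2, fun j => ?_⟩
      rw [H2 j, hc1, hc2]
      rw [pyGetD_pyAddAt (pyAddAt acc (((l.getD 0 0 + 100).toNat : Nat) : Int) 1)
            (l.getD 1 0 + 101).toNat (by rw [length_pyAddAt, hacc]; omega) (-1) j]
      rw [pyGetD_pyAddAt acc (l.getD 0 0 + 100).toNat (by rw [hacc]; omega) 1 j]
      simp only [dcov, dSeg, List.map_cons, List.sum_cons, if_pos hab]
      split_ifs <;> omega
    · rw [if_neg hab]
      obtain ⟨L2, H2⟩ := ih hls acc hacc
      refine ⟨L2, fun j => ?_⟩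
      rw [H2 j]
      simp only [dcov, dSeg, List.map_cons, List.sum_cons, if_neg hab]
      ring

lemma cov_neg (lines : List (List Int)) (hpre : Pre_solution lines) (j : Int) (hj : j < 0) :
    cov lines j = 0 := by
  revert hpre
  induction lines with
  | nil => intro _; simp [cov]
  | cons l ls ih =>
    intro hpre
    have hl := hpre l List.mem_cons_self
    have hls : Pre_solution ls := fun x hx => hpre x (List.mem_cons_of_mem _ hx)
    have hih := ih hls
    simp only [cov, List.map_cons, List.sum_cons] at hih ⊢
    rw [hih, covSeg, if_neg (by rintro ⟨h1, h2, -⟩; have := hl.2 h1; omega)]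
    ring

lemma cov_succ (lines : List (List Int)) (k : Int) :
    cov lines k = cov lines (k - 1) + dcov lines k := by
  induction lines with
  | nil => simp [cov, dcov]
  | cons l ls ih =>
    simp only [cov, dcov, covSeg, dSeg, List.map_cons, List.sum_cons] at ih ⊢
    split_ifs <;> omega

lemma scanA_cnt2 (li : List Int) (hcnt : PySem.List.count li 2 = 2) (L : List Int) :
    L.foldl (fun answer k => if 1 < PySem.List.pyGetD li k 0 then
        if 1 < PySem.List.pyGetD li (k - 1) 0 ∧ PySem.List.count li 2 ≠ 2 then answer + 1 else answer
      else answer) (0 : Int) = 0 := by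
  have hcnt' : List.count 2 li = 2 := by rw [← PySem.List.count_eq]; exact hcnt
  simp [PySem.List.count_eq, hcnt']

lemma scanA_count (li : List Int) (cv : Int → Int)
    (hget : ∀ k : Int, 0 ≤ k → k < 201 → PySem.List.pyGetD li k 0 = cv k)
    (hcnt : PySem.List.count li 2 ≠ 2) :
    ∀ n : Nat, n ≤ 201 →
    (PySem.List.pyRange 1 (n : Int)).foldl
      (fun answer k => if 1 < PySem.List.pyGetD li k 0 then
          if 1 < PySem.List.pyGetD li (k - 1) 0 ∧ PySem.List.count li 2 ≠ 2 then answer + 1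
          else answer
        else answer) 0
      = ((List.range n).countP
          (fun j : Nat => decide (1 ≤ j ∧ 1 < cv (j : Int) ∧ 1 < cv ((j : Int) - 1))) : Int) := by
  intro n
  induction n with
  | zero => intro _; rw [PySem.List.pyRange_one_eq_nil (by norm_num)]; simp
  | succ n ihn =>
    intro hn
    by_cases h1 : n = 0
    · subst h1
      rw [PySem.List.pyRange_one_eq_nil (by norm_num)]
      simp
    · have hcast : ((n + 1 : Nat) : Int) = (n : Int) + 1 := by push_cast; ring
      rw [hcast, PySem.List.pyRange_one_succ_right (by omega), List.foldl_append,
        ihn (by omega)]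
      simp only [List.foldl_cons, List.foldl_nil]
      rw [hget (n : Int) (by omega) (by omega), hget ((n : Int) - 1) (by omega) (by omega)]
      simp only [ne_eq, hcnt, not_false_eq_true, and_true]
      rw [List.range_succ, List.countP_append]
      simp only [List.countP_cons, List.countP_nil]
      split_ifs <;> simp_all <;> omega

lemma scanB_spec (cv dv : Int → Int) (hrec : ∀ k : Int, cv k = cv (k - 1) + dv k)
    (hneg : cv (-1) = 0) (diff : List Int)
    (hd : ∀ k : Int, 0 ≤ k → k < 201 → PySem.List.pyGetD diff k 0 = dv k) :
    ∀ n : Nat, n ≤ 201 →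
    (PySem.List.pyRange 0 (n : Int)).foldl
      (fun (st : Int × Int × Int × Int) k =>
        let run := st.1 + PySem.List.pyGetD diff k 0
        let twos := if run = 2 then st.2.2.1 + 1 else st.2.2.1
        let pairs := if 0 < k ∧ 1 < run ∧ 1 < st.2.1 then st.2.2.2 + 1 else st.2.2.2
        (run, run, twos, pairs)) (0, 0, 0, 0)
    = (cv ((n : Int) - 1), cv ((n : Int) - 1),
       ((List.range n).countP (fun j : Nat => cv (j : Int) == 2) : Int),
       ((List.range n).countP
         (fun j : Nat => decide (1 ≤ j ∧ 1 < cv (j : Int) ∧ 1 < cv ((j : Int) - 1))) : Int)) := by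
  intro n
  induction n with
  | zero => intro _; rw [PySem.List.pyRange_one_eq_nil (by norm_num)]; simp [hneg]
  | succ n ihn =>
    intro hn
    have hcast : ((n + 1 : Nat) : Int) = (n : Int) + 1 := by push_cast; ring
    rw [hcast, PySem.List.pyRange_one_succ_right (by omega), List.foldl_append, ihn (by omega)]
    simp only [List.foldl_cons, List.foldl_nil]
    rw [hd (n : Int) (by omega) (by omega)]
    have hrun : cv ((n : Int) - 1) + dv (n : Int) = cv (n : Int) := (hrec (n : Int)).symm
    rw [hrun]
    simp only [List.range_succ, List.countP_append, List.countP_cons, List.countP_nil]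
    have hc2 : ((n : Int) + 1) - 1 = (n : Int) := by ring
    rw [hc2]
    refine Prod.ext rfl (Prod.ext rfl (Prod.ext ?_ ?_))
    · simp only []
      by_cases h : cv (n : Int) = 2
      · have hb : (cv ((n : Nat) : Int) == 2) = true := by simpa using h
        rw [if_pos h, hb]
        simp
      · have hb : (cv ((n : Nat) : Int) == 2) = false := by simpa using h
        rw [if_neg h, hb]
        simp
    · simp only []
      by_cases h : 0 < ((n : Nat) : Int) ∧ 1 < cv ((n : Nat) : Int) ∧ 1 < cv (((n : Nat) : Int) - 1)
      · have hb : decide (1 ≤ n ∧ 1 < cv ((n : Nat) : Int) ∧ 1 < cv (((n : Nat) : Int) - 1)) = true := by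
          rw [decide_eq_true_iff]
          exact ⟨by omega, h.2.1, h.2.2⟩
        rw [if_pos h, hb]
        simp
      · have hb : decide (1 ≤ n ∧ 1 < cv ((n : Nat) : Int) ∧ 1 < cv (((n : Nat) : Int) - 1)) = false := by
          rw [decide_eq_false_iff_not]
          rintro ⟨h1, h2, h3⟩
          exact h ⟨by omega, h2, h3⟩
        rw [if_neg h, hb]
        simp

-- ===== VERDICT (by name: the statement is the Claim_ definition above) =====
set_option maxRecDepth 8192 in
set_option maxHeartbeats 2000000 in
theorem solution_spec : Claim_equal_solution := by
  intro lines _ hpre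
  unfold Spec_solution solution solution_alt
  simp only []
  obtain ⟨LA, HA⟩ := liA_spec lines hpre (List.replicate 201 0) (by simp)
  obtain ⟨LB, HB⟩ := diffB_spec lines hpre (List.replicate 202 0) (by simp)
  set liA := List.foldl
    (fun li i =>
      (PySem.List.pyRange (PySem.List.pyGetD i 0 0 + 100) (PySem.List.pyGetD i 1 0 + 101)).foldl
        (fun li j => pyAddAt li j 1) li) (List.replicate 201 0) lines with hliA
  set diffB := List.foldl
    (fun diff seg =>
      let a := PySem.List.pyGetD seg 0 0
      let b := PySem.List.pyGetD seg 1 0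
      if a ≤ b then pyAddAt (pyAddAt diff (a + 100) 1) (b + 101) (-1) else diff)
    (List.replicate 202 0) lines with hdiffB
  have hgetA : ∀ k : Int, 0 ≤ k → k < 201 → PySem.List.pyGetD liA k 0 = cov lines k := by
    intro k hk0 hk1
    have h := HA k.toNat
    rw [Int.toNat_of_nonneg hk0] at h
    rw [h, PySem.List.pyGetD_eq_getElem _ 0 hk0 (by simp; omega), List.getElem_replicate]
    ring
  have hgetB : ∀ k : Int, 0 ≤ k → k < 201 → PySem.List.pyGetD diffB k 0 = dcov lines k := by
    intro k hk0 hk1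
    have h := HB k.toNat
    rw [Int.toNat_of_nonneg hk0] at h
    rw [h, PySem.List.pyGetD_eq_getElem _ 0 hk0 (by simp; omega), List.getElem_replicate]
    ring
  have hlist : liA = (List.range 201).map (fun j : Nat => cov lines (j : Int)) := by
    apply List.ext_getElem (by rw [LA]; simp)
    intro i h1 h2
    have h := HA i
    rw [PySem.List.pyGetD_natCast, PySem.List.pyGetD_natCast] at h
    rw [List.getD_eq_getElem liA 0 h1,
        List.getD_eq_getElem _ 0 (by rw [List.length_replicate, ← LA]; exact h1),
        List.getElem_replicate] at h
    rw [h]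
    simp [List.getElem_map, List.getElem_range]
  have hcount : PySem.List.count liA 2
      = List.countP (fun j : Nat => cov lines (j : Int) == 2) (List.range 201) := by
    rw [PySem.List.count_eq, hlist, List.count, List.countP_map]
    rfl
  have hlenA : ((liA.length : Nat) : Int) = (201 : Int) := by rw [LA]; norm_num
  rw [hlenA]
  have hB := scanB_spec (cov lines) (dcov lines) (cov_succ lines)
    (cov_neg lines hpre (-1) (by norm_num)) diffB hgetB 201 le_rfl
  rw [show ((201 : Nat) : Int) = (201 : Int) from by norm_num] at hB
  simp only [] at hB
  have hA2 := scanA_count liA (cov lines) hgetA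
  by_cases hc : PySem.List.count liA 2 = 2
  · have hT : ((List.countP (fun j : Nat => cov lines (j : Int) == 2) (List.range 201) : Nat) : Int)
        = 2 := by rw [← hcount, hc]; rfl
    refine (scanA_cnt2 liA hc (PySem.List.pyRange 1 201)).trans ?_
    rw [hB, if_pos hT]
  · have hA := hA2 hc 201 le_rfl
    rw [show ((201 : Nat) : Int) = (201 : Int) from by norm_num] at hA
    have hT : ¬ ((List.countP (fun j : Nat => cov lines (j : Int) == 2) (List.range 201) : Nat) : Int)
        = 2 := by rw [← hcount]; exact_mod_cast hc
    refine hA.trans ?_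
    rw [hB, if_neg hT]
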